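-- pv_equiv track=rewrite | github.com/RudreshGade/python | seq A/mes.py | mexcn
-- ===== SOURCE A (Python) =====
-- def mexcn(S, Q, n):
--
--     mx = Q
--     skip = n
--     while skip > 0 or mx in S:
--         if mx not in S:
--             skip -= 1
--         mx += 1
--     return mx
-- ===== SOURCE B (Python) =====
-- def mexcn(S, Q, n):
--     members = sorted({x for x in S if x >= Q})
--     c = Q + (n if n > 0 else 0)
--     for x in members:
--         if x <= c:
--             c += 1
--         else:
--             break
--     return c
-- ===== Notes on version B (the rewrite author's own statement) =====
-- stated objective: alternative
-- what changed: Instead of scanning every integer upward from Q and testing list membership at each step, B sorts the distinct members of S that are >= Q once and bumps the candidate Q+max(n,0) past each such member in a single pass.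
import Mathlib
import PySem

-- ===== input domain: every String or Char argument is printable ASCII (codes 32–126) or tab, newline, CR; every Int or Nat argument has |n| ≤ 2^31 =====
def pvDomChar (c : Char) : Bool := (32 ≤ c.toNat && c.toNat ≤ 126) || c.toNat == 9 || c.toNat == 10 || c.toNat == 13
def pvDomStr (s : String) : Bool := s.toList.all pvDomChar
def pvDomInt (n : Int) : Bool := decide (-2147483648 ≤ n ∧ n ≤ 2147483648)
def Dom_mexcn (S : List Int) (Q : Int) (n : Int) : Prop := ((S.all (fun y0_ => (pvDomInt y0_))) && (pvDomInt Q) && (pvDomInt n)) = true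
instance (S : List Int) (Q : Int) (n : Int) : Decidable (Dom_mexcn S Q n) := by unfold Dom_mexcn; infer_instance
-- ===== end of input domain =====

-- B replaces A's one-by-one membership scan from Q with a single pass over the sorted distinct members of S that are ≥ Q, starting from the candidate Q+max(n,0).

-- ===== PORT A =====
-- termination helpers for A's while loop (cited by decreasing_by)
theorem pvFiltLe (S : List Int) (m : Int) :
    (S.filter (fun x => decide (m < x))).length ≤ (S.filter (fun x => decide (m ≤ x))).length := by
  induction S with
  | nil => simp
  | cons a t ih =>
    by_cases h : m < a
    · have h' : m ≤ a := le_of_lt h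
      simp [List.filter, h, h']; omega
    · by_cases h' : m ≤ a <;> simp [List.filter, h, h'] <;> omega

theorem pvFiltLt (S : List Int) (m : Int) (hm : m ∈ S) :
    (S.filter (fun x => decide (m < x))).length < (S.filter (fun x => decide (m ≤ x))).length := by
  induction S with
  | nil => simp at hm
  | cons a t ih =>
    rcases List.mem_cons.mp hm with h | h
    · subst h
      have h1 : ¬ (m < m) := by omega
      simp [List.filter]
      have := pvFiltLe t m
      omega
    · by_cases ha : m < a
      · have ha' : m ≤ a := le_of_lt ha
        simp [List.filter, ha, ha']
        have := ih h
        omega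
      · by_cases ha' : m ≤ a <;> simp [List.filter, ha, ha'] <;>
          · have := ih h
            omega

-- the while loop of A: state (mx, skip)
def mexcnLoop (S : List Int) (mx : Int) (skip : Int) : Int :=
  if h : skip > 0 ∨ mx ∈ S then
    if hm : mx ∈ S then
      mexcnLoop S (mx + 1) skip
    else
      mexcnLoop S (mx + 1) (skip - 1)
  else mx
termination_by skip.toNat + (S.filter (fun x => decide (mx ≤ x))).length
decreasing_by
  · simp only [Int.add_one_le_iff]
    have := pvFiltLt S mx hm; omega
  · have hs : skip > 0 := by tauto
    simp only [Int.add_one_le_iff]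
    have := pvFiltLe S mx; omega

def mexcn (S : List Int) (Q : Int) (n : Int) : Int :=
  mexcnLoop S Q n

-- ===== PORT B =====
-- walk the sorted distinct members ≥ Q, bumping the candidate past each member ≤ it
def mexcnAltGo : List Int → Int → Int
  | [], c => c
  | x :: rest, c => if x ≤ c then mexcnAltGo rest (c + 1) else c

def mexcn_alt (S : List Int) (Q : Int) (n : Int) : Int :=
  let members := PySem.List.sorted (PySem.Set.ofList (S.filter (fun x => decide (Q ≤ x)))) (fun x => x) false
  mexcnAltGo members (Q + (if n > 0 then n else 0))

-- ===== PRECONDITION & SPEC =====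
def Spec_mexcn (S : List Int) (Q : Int) (n : Int) (out : Int) : Prop := out = mexcn_alt S Q n
instance (S : List Int) (Q : Int) (n : Int) (out : Int) : Decidable (Spec_mexcn S Q n out) := by unfold Spec_mexcn; infer_instance

-- ===== CLAIM (what is proved, stated in full; the proofs are below) =====
def Claim_equal_mexcn : Prop := ∀ (S : List Int) (Q : Int) (n : Int), Dom_mexcn S Q n → Spec_mexcn S Q n (mexcn S Q n)

-- ===== LEMMAS AND PROOFS =====

-- the sorted distinct members of S that are ≥ m (proof-only abbreviation)
def pvMs (S : List Int) (m : Int) : List Int :=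
  PySem.List.sorted (PySem.Set.ofList (S.filter (fun x => decide (m ≤ x)))) (fun x => x) false

theorem pvMs_pairwise (S : List Int) (m : Int) : (pvMs S m).Pairwise (· < ·) :=
  PySem.List.sorted_ofList_pairwise_lt _

theorem pvMs_mem (S : List Int) (m a : Int) : a ∈ pvMs S m ↔ a ∈ S ∧ m ≤ a := by
  simp [pvMs, PySem.List.mem_sorted, PySem.Set.mem_ofList, List.mem_filter]

-- two strictly increasing lists with the same members are equal
theorem pvStrictExt : ∀ (l₁ l₂ : List Int), l₁.Pairwise (· < ·) → l₂.Pairwise (· < ·) →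
    (∀ a, a ∈ l₁ ↔ a ∈ l₂) → l₁ = l₂ := by
  intro l₁
  induction l₁ with
  | nil =>
    intro l₂ _ _ hmem
    cases l₂ with
    | nil => rfl
    | cons b t => exact absurd ((hmem b).mpr (List.mem_cons_self)) (by simp)
  | cons a t ih =>
    intro l₂ h1 h2 hmem
    cases l₂ with
    | nil => exact absurd ((hmem a).mp List.mem_cons_self) (by simp)
    | cons b u =>
      have hab : a = b := by
        have hameml : a ∈ b :: u := (hmem a).mp List.mem_cons_self
        have hbmem : b ∈ a :: t := (hmem b).mpr List.mem_cons_self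
        rcases List.mem_cons.mp hameml with h | h
        · exact h
        · rcases List.mem_cons.mp hbmem with h' | h'
          · exact h'.symm
          · have : b < a := (List.pairwise_cons.mp h2).1 a h
            have : a < b := (List.pairwise_cons.mp h1).1 b h'
            omega
      subst hab
      have htu : t = u := by
        apply ih u (List.pairwise_cons.mp h1).2 (List.pairwise_cons.mp h2).2
        intro x
        constructor
        · intro hx
          have hxl : x ∈ a :: u := (hmem x).mp (List.mem_cons_of_mem _ hx)
          rcases List.mem_cons.mp hxl with h | h
          · exact absurd ((List.pairwise_cons.mp h1).1 x hx) (by omega)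
          · exact h
        · intro hx
          have hxl : x ∈ a :: t := (hmem x).mpr (List.mem_cons_of_mem _ hx)
          rcases List.mem_cons.mp hxl with h | h
          · exact absurd ((List.pairwise_cons.mp h2).1 x hx) (by omega)
          · exact h
      rw [htu]

theorem pvMs_stepNon (S : List Int) (m : Int) (h : m ∉ S) : pvMs S m = pvMs S (m + 1) := by
  apply pvStrictExt _ _ (pvMs_pairwise S m) (pvMs_pairwise S (m + 1))
  intro a
  rw [pvMs_mem, pvMs_mem]
  constructor
  · rintro ⟨hs, hle⟩
    have : a ≠ m := fun he => h (he ▸ hs)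
    exact ⟨hs, by omega⟩
  · rintro ⟨hs, hle⟩; exact ⟨hs, by omega⟩

theorem pvMs_stepMem (S : List Int) (m : Int) (h : m ∈ S) : pvMs S m = m :: pvMs S (m + 1) := by
  apply pvStrictExt _ _ (pvMs_pairwise S m)
  · refine List.pairwise_cons.mpr ⟨?_, pvMs_pairwise S (m + 1)⟩
    intro b hb
    have := (pvMs_mem S (m + 1) b).mp hb
    omega
  · intro a
    rw [pvMs_mem, List.mem_cons, pvMs_mem]
    constructor
    · rintro ⟨hs, hle⟩
      by_cases ha : a = m
      · exact Or.inl ha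
      · exact Or.inr ⟨hs, by omega⟩
    · rintro (ha | ⟨hs, hle⟩)
      · exact ⟨ha ▸ h, by omega⟩
      · exact ⟨hs, by omega⟩

-- the bridge: A's loop from (m, skip) equals B's walk over the sorted members ≥ m
theorem pvBridge (S : List Int) (m skip : Int) :
    mexcnLoop S m skip = mexcnAltGo (pvMs S m) (m + max skip 0) := by
  induction m, skip using mexcnLoop.induct S with
  | case1 m skip h hm ih =>
    rw [mexcnLoop, dif_pos h, dif_pos hm, ih, pvMs_stepMem S m hm]
    have hle : m ≤ m + max skip 0 := by omega
    simp only [mexcnAltGo]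
    rw [if_pos hle]
    congr 1
    omega
  | case2 m skip h hm ih =>
    have hs : skip > 0 := by tauto
    rw [mexcnLoop, dif_pos h, dif_neg hm, ih, pvMs_stepNon S m hm]
    congr 1
    omega
  | case3 m skip h =>
    rcases not_or.mp h with ⟨hs, hm⟩
    rw [mexcnLoop, dif_neg h]
    have hmax : max skip 0 = 0 := by omega
    rw [hmax]
    cases hms : pvMs S m with
    | nil => simp [mexcnAltGo]
    | cons x t =>
      have hx : x ∈ S ∧ m ≤ x := (pvMs_mem S m x).mp (hms ▸ List.mem_cons_self)
      have hxm : ¬ (x ≤ m + 0) := by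
        have : x ≠ m := fun he => hm (he ▸ hx.1)
        omega
      simp only [mexcnAltGo]
      rw [if_neg hxm]
      omega

-- ===== VERDICT (by name: the statement is the Claim_ definition above) =====
theorem mexcn_spec : Claim_equal_mexcn := by
  intro S Q n _
  unfold Spec_mexcn mexcn mexcn_alt
  rw [pvBridge]
  show mexcnAltGo (pvMs S Q) (Q + max n 0) = _
  have h : Q + max n 0 = Q + (if n > 0 then n else 0) := by omega
  rw [h]
  rfl
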